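-- pv_equiv track=rewrite | github.com/RoberickSanders/b2b-outbound-stack | export.py | score_contact
-- ===== SOURCE A (Python) =====
-- def score_contact(title):
--     """Score a contact by title. Returns (score, priority)."""
--     t = title.lower() if title else ""
--     score = 0
--     priority = "low"
--     if any(k in t for k in [
--         "owner", "founder", "co-founder", "president",
--         "principal", "managing partner", "partner", "managing director"
--     ]):
--         score += 5
--         priority = "owner"
--     elif "ceo" in t:
--         score += 4
--         priority = "executive"
--     elif any(k in t for k in ["cto", "chief technology officer", "chief information officer", "coo", "chief operating officer"]):
--         score += 4
--         priority = "executive"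
--     elif any(k in t for k in ["vp", "vice president"]):
--         score += 3
--         priority = "buyer"
--     elif any(k in t for k in [
--         "director of operations", "director of facilities", "director of engineering",
--         "director of maintenance", "director of safety", "director of security",
--         "director of property", "director of construction",
--         "head of operations", "head of facilities", "head of engineering",
--         "general manager", "property manager", "facilities manager",
--         "operations manager", "maintenance manager", "safety manager",
--         "regional manager", "area manager", "district manager",
--     ]):
--         score += 2
--         priority = "buyer"
--     elif "director" in t and t.strip() != "director":
--         score += 1
--         priority = "buyer"
--     elif "director" in t:
--         score += 0
--         priority = "low"
--     elif any(k in t for k in ["manager", "lead"]):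
--         score += 1
--         priority = "buyer"
--     return score, priority
-- ===== SOURCE B (Python) =====
-- # Exhaustive-match + argmin selection instead of a first-match if/elif cascade:
-- # evaluate every rule, collect the ranks of all rules that fire, and return the
-- # result of the lowest (best) rank.  (objective: alternative decomposition)
--
-- TIERS = [
--     (["owner", "founder", "co-founder", "president",
--       "principal", "managing partner", "partner", "managing director"]),
--     (["ceo"]),
--     (["cto", "chief technology officer", "chief information officer",
--       "coo", "chief operating officer"]),
--     (["vp", "vice president"]),
--     (["director of operations", "director of facilities", "director of engineering",
--       "director of maintenance", "director of safety", "director of security",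
--       "director of property", "director of construction",
--       "head of operations", "head of facilities", "head of engineering",
--       "general manager", "property manager", "facilities manager",
--       "operations manager", "maintenance manager", "safety manager",
--       "regional manager", "area manager", "district manager"]),
-- ]
--
-- RESULTS = [
--     (5, "owner"), (4, "executive"), (4, "executive"), (3, "buyer"), (2, "buyer"),
--     (1, "buyer"),   # director, not bare
--     (0, "low"),     # bare "director"
--     (1, "buyer"),   # manager / lead
--     (0, "low"),     # default
-- ]
--
--
-- def score_contact(title):
--     """Score a contact by title. Returns (score, priority)."""
--     t = title.lower() if title else ""
--     hits = [8]
--     for i, ks in enumerate(TIERS):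
--         if any(k in t for k in ks):
--             hits.append(i)
--     if "director" in t:
--         hits.append(5 if t.strip() != "director" else 6)
--     if any(k in t for k in ["manager", "lead"]):
--         hits.append(7)
--     return RESULTS[min(hits)]
-- ===== Notes on version B (the rewrite author's own statement) =====
-- stated objective: alternative
-- what changed: Replaced the short-circuiting if/elif cascade with exhaustive matching: every rule is evaluated, the ranks of all firing rules are collected, and the result of the minimum (best) rank is returned from a results table.
import Mathlib
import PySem

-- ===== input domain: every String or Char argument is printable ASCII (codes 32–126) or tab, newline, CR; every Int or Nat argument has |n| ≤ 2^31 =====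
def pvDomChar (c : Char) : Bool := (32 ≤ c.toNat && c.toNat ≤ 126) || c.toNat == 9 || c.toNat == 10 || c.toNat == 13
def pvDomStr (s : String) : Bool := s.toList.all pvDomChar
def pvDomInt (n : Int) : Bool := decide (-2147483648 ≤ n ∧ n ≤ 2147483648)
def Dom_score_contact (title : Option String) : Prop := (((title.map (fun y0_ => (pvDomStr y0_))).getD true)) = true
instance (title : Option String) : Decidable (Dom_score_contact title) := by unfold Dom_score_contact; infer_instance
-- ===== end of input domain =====

-- B replaces A's short-circuiting if/elif cascade by exhaustive matching: all rules are
-- evaluated, the ranks of the firing rules are collected, and the minimum rank selects the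
-- result from a table (objective: alternative decomposition, same cost).

-- ===== PORT A =====
def score_contact (title : Option String) : Int × String :=
  let t : String := match title with
    | some s => if s == "" then "" else PySem.Str.lower s
    | none => ""
  if ["owner", "founder", "co-founder", "president",
      "principal", "managing partner", "partner", "managing director"].any
        (fun k => PySem.Str.isIn k t) then
    (0 + 5, "owner")
  else if PySem.Str.isIn "ceo" t then
    (0 + 4, "executive")
  else if ["cto", "chief technology officer", "chief information officer", "coo",
           "chief operating officer"].any (fun k => PySem.Str.isIn k t) then
    (0 + 4, "executive")
  else if ["vp", "vice president"].any (fun k => PySem.Str.isIn k t) then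
    (0 + 3, "buyer")
  else if ["director of operations", "director of facilities", "director of engineering",
           "director of maintenance", "director of safety", "director of security",
           "director of property", "director of construction",
           "head of operations", "head of facilities", "head of engineering",
           "general manager", "property manager", "facilities manager",
           "operations manager", "maintenance manager", "safety manager",
           "regional manager", "area manager", "district manager"].any
             (fun k => PySem.Str.isIn k t) then
    (0 + 2, "buyer")
  else if PySem.Str.isIn "director" t && (PySem.Str.strip t != "director") then
    (0 + 1, "buyer")
  else if PySem.Str.isIn "director" t then
    (0 + 0, "low")
  else if ["manager", "lead"].any (fun k => PySem.Str.isIn k t) then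
    (0 + 1, "buyer")
  else
    (0, "low")

-- ===== PORT B =====
def scTiers : List (List String) :=
  [["owner", "founder", "co-founder", "president",
    "principal", "managing partner", "partner", "managing director"],
   ["ceo"],
   ["cto", "chief technology officer", "chief information officer",
    "coo", "chief operating officer"],
   ["vp", "vice president"],
   ["director of operations", "director of facilities", "director of engineering",
    "director of maintenance", "director of safety", "director of security",
    "director of property", "director of construction",
    "head of operations", "head of facilities", "head of engineering",
    "general manager", "property manager", "facilities manager",
    "operations manager", "maintenance manager", "safety manager",
    "regional manager", "area manager", "district manager"]]

def scResults : List (Int × String) :=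
  [(5, "owner"), (4, "executive"), (4, "executive"), (3, "buyer"), (2, "buyer"),
   (1, "buyer"), (0, "low"), (1, "buyer"), (0, "low")]

def score_contact_alt (title : Option String) : Int × String :=
  let t : String := match title with
    | some s => if s == "" then "" else PySem.Str.lower s
    | none => ""
  let hits : List Int :=
    (PySem.List.enumerate scTiers 0).foldl
      (fun hs p => if p.2.any (fun k => PySem.Str.isIn k t) then hs ++ [p.1] else hs) [8]
  let hits :=
    if PySem.Str.isIn "director" t then
      hits ++ [if PySem.Str.strip t != "director" then (5 : Int) else 6]
    else hits
  let hits :=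
    if ["manager", "lead"].any (fun k => PySem.Str.isIn k t) then hits ++ [(7 : Int)]
    else hits
  ((PySem.List.pyGet? scResults ((PySem.List.min? hits (fun x => x)).getD 8)).getD (0, "low"))

-- ===== PRECONDITION & SPEC =====
def Spec_score_contact (title : Option String) (out : Int × String) : Prop := out = score_contact_alt title
instance (title : Option String) (out : Int × String) : Decidable (Spec_score_contact title out) := by unfold Spec_score_contact; infer_instance

-- ===== CLAIM (what is proved, stated in full; the proofs are below) =====
def Claim_equal_score_contact : Prop := ∀ (title : Option String), Dom_score_contact title → Spec_score_contact title (score_contact title)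

-- ===== LEMMAS AND PROOFS =====

lemma score_contact_eq_alt (title : Option String) :
    score_contact title = score_contact_alt title := by
  unfold score_contact score_contact_alt scTiers scResults
  set t : String := match title with
    | some s => if s == "" then "" else PySem.Str.lower s
    | none => "" with ht
  clear ht
  simp only [PySem.List.enumerate_cons, PySem.List.enumerate_nil, List.foldl_cons,
    List.foldl_nil]
  generalize (["owner", "founder", "co-founder", "president",
      "principal", "managing partner", "partner", "managing director"].any
        (fun k => PySem.Str.isIn k t)) = a1
  rw [show (["ceo"].any fun k => PySem.Str.isIn k t) = PySem.Str.isIn "ceo" t from by simp]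
  generalize PySem.Str.isIn "ceo" t = a2
  generalize (["cto", "chief technology officer", "chief information officer", "coo",
           "chief operating officer"].any (fun k => PySem.Str.isIn k t)) = a3
  generalize (["vp", "vice president"].any (fun k => PySem.Str.isIn k t)) = a4
  generalize (["director of operations", "director of facilities", "director of engineering",
           "director of maintenance", "director of safety", "director of security",
           "director of property", "director of construction",
           "head of operations", "head of facilities", "head of engineering",
           "general manager", "property manager", "facilities manager",
           "operations manager", "maintenance manager", "safety manager",
           "regional manager", "area manager", "district manager"].any
             (fun k => PySem.Str.isIn k t)) = a5
  generalize PySem.Str.isIn "director" t = d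
  generalize (PySem.Str.strip t != "director") = st
  generalize (["manager", "lead"].any (fun k => PySem.Str.isIn k t)) = m
  clear_value t
  clear t title
  revert a1 a2 a3 a4 a5 d st m
  decide

-- ===== VERDICT (by name: the statement is the Claim_ definition above) =====
theorem score_contact_spec : Claim_equal_score_contact := by
  intro title _
  exact score_contact_eq_alt title
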